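-- pv_equiv track=rewrite | github.com/ashkan346a/web3test | core/views.py | pick_by_lang
-- ===== SOURCE A (Python) =====
-- LANG_FALLBACKS = ["fa", "en", "tr", "ar"]
--
-- def pick_by_lang(obj: dict, field: str, lang: str, fallbacks=None) -> str:
--     if fallbacks is None:
--         fallbacks = LANG_FALLBACKS
--     # first try exact lang
--     v = obj.get(f"{field}_{lang}")
--     if v:
--         return str(v)
--     # then fallbacks in order (skip lang if duplicated)
--     for ln in fallbacks:
--         if ln == lang:
--             continue
--         vv = obj.get(f"{field}_{ln}")
--         if vv:
--             return str(vv)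
--     # fallback to generic field keys
--     if obj.get(field):
--         return str(obj.get(field))
--
--     return str(obj.get(f"{field}") or obj.get("title") or "")
-- ===== SOURCE B (Python) =====
-- LANG_FALLBACKS = ["fa", "en", "tr", "ar"]
--
-- def pick_by_lang(obj: dict, field: str, lang: str, fallbacks=None) -> str:
--     if fallbacks is None:
--         fallbacks = LANG_FALLBACKS
--     # Inverted loop: instead of probing the dict key by key in priority order,
--     # rank every acceptable key once, then scan the object's items a single
--     # time, keeping the truthy entry with the smallest rank.
--     rank = {}
--     for i, k in enumerate([f"{field}_{lang}"]
--                           + [f"{field}_{ln}" for ln in fallbacks if ln != lang]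
--                           + [field, "title"]):
--         rank.setdefault(k, i)
--     best_r = None
--     best_v = ""
--     for k, v in obj.items():
--         if v:
--             r = rank.get(k)
--             if r is not None and (best_r is None or r < best_r):
--                 best_r, best_v = r, v
--     return str(best_v) if best_r is not None else ""
-- ===== Notes on version B (the rewrite author's own statement) =====
-- stated objective: alternative
-- what changed: A probes the dict key by key in priority order through three staged phases; B inverts the loop: it builds a rank table of acceptable keys once, then makes a single pass over the object's items tracking the truthy entry of minimal rank.
import Mathlib
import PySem

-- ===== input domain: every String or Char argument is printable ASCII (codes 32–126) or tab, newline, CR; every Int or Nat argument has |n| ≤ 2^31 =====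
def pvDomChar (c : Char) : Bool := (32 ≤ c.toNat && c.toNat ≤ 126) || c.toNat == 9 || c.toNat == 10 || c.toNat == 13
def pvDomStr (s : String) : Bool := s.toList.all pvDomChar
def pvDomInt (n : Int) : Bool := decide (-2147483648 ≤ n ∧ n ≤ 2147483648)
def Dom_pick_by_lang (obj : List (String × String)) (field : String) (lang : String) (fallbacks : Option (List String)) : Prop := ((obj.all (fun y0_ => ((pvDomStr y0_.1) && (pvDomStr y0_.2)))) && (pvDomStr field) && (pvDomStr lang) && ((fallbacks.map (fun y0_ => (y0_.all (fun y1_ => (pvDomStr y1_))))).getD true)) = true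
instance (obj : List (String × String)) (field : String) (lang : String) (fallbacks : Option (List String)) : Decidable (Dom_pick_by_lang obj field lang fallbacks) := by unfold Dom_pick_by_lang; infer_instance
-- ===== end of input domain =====

-- B inverts A's key probing: it ranks the acceptable keys once, then scans the object's items in one pass
-- keeping the truthy entry of minimal rank (objective: alternative algorithm; return value proved equal).


-- shared primitive: Python dict.get on the association list (first match)
def pvGet (obj : List (String × String)) (k : String) : Option String :=
  PySem.Dict.get? (PySem.Dict.mk obj) k

-- Python truthiness of an Optional[str]
def pvTruthy : Option String → Bool
  | some s => !(s == "")
  | none => false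

-- ===== PORT A =====
-- the 'for ln in fallbacks' loop of A
def pickLoopA (obj : List (String × String)) (field : String) (lang : String) : List String → String
  | [] =>
      -- fallback to generic field keys
      if pvTruthy (pvGet obj field) then (pvGet obj field).getD ""
      else
        -- str(obj.get(field) or obj.get("title") or ""): str of the surviving string is itself
        (if pvTruthy (pvGet obj field) then pvGet obj field
         else if pvTruthy (pvGet obj "title") then pvGet obj "title"
         else some "").getD ""
  | ln :: rest =>
      if ln == lang then pickLoopA obj field lang rest
      else
        match pvGet obj (field ++ "_" ++ ln) with
        | some vv => if !(vv == "") then vv else pickLoopA obj field lang rest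
        | none => pickLoopA obj field lang rest

def pick_by_lang (obj : List (String × String)) (field : String) (lang : String) (fallbacks : Option (List String)) : String :=
  let fallbacks := fallbacks.getD ["fa", "en", "tr", "ar"]
  match pvGet obj (field ++ "_" ++ lang) with
  | some v => if !(v == "") then v else pickLoopA obj field lang fallbacks
  | none => pickLoopA obj field lang fallbacks

-- ===== PORT B =====
-- model of Python's dict.items() on the association list: one entry per key, first occurrence
-- (the convention's first-match value); on a real Python dict keys are unique, so it is the identity there
def pyItems : List (String × String) → List String → List (String × String)
  | [], _ => []
  | (k, v) :: rest, seen =>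
      if k ∈ seen then pyItems rest seen else (k, v) :: pyItems rest (k :: seen)

-- the body of B's 'for k, v in obj.items()' loop, lifted to a named helper
def bStep (rank : PySem.Dict String Int) (best : Option (Int × String)) (p : String × String) :
    Option (Int × String) :=
  if !(p.2 == "") then
    match PySem.Dict.get? rank p.1 with
    | some r =>
        match best with
        | none => some (r, p.2)
        | some q => if r < q.1 then some (r, p.2) else best
    | none => best
  else best

def pick_by_lang_alt (obj : List (String × String)) (field : String) (lang : String) (fallbacks : Option (List String)) : String :=
  let fb := fallbacks.getD ["fa", "en", "tr", "ar"]
  -- rank = {}; for i, k in enumerate([...]): rank.setdefault(k, i)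
  let rank := (PySem.List.enumerate
      ((field ++ "_" ++ lang) ::
        ((fb.filter (fun ln => !(ln == lang))).map (fun ln => field ++ "_" ++ ln) ++ [field, "title"]))).foldl
    (fun d p => PySem.Dict.setdefault d p.2 p.1) (PySem.Dict.mk [])
  -- single pass over the items, tracking (best_r, best_v)
  let best := (pyItems obj []).foldl (bStep rank) (none : Option (Int × String))
  match best with
  | some q => q.2
  | none => ""

-- ===== PRECONDITION & SPEC =====
def Spec_pick_by_lang (obj : List (String × String)) (field : String) (lang : String) (fallbacks : Option (List String)) (out : String) : Prop := out = pick_by_lang_alt obj field lang fallbacks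
instance (obj : List (String × String)) (field : String) (lang : String) (fallbacks : Option (List String)) (out : String) : Decidable (Spec_pick_by_lang obj field lang fallbacks out) := by unfold Spec_pick_by_lang; infer_instance

-- ===== CLAIM (what is proved, stated in full; the proofs are below) =====
def Claim_equal_pick_by_lang : Prop := ∀ (obj : List (String × String)) (field : String) (lang : String) (fallbacks : Option (List String)), Dom_pick_by_lang obj field lang fallbacks → Spec_pick_by_lang obj field lang fallbacks (pick_by_lang obj field lang fallbacks)

-- ===== LEMMAS AND PROOFS =====

-- the ordered candidate-key list both proofs talk about
def keysOf (field lang : String) (fallbacks : Option (List String)) : List String :=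
  (field ++ "_" ++ lang) ::
    (((fallbacks.getD ["fa", "en", "tr", "ar"]).filter (fun ln => !(ln == lang))).map
      (fun ln => field ++ "_" ++ ln) ++ [field, "title"])

-- first truthy value along a key list (reference form of A)
def firstTruthy (obj : List (String × String)) : List String → String
  | [] => ""
  | k :: ks =>
      match pvGet obj k with
      | some v => if !(v == "") then v else firstTruthy obj ks
      | none => firstTruthy obj ks

-- the candidate extractor: the truthy value of a key, if any
def fA (obj : List (String × String)) (k : String) : Option String :=
  match pvGet obj k with
  | some v => if v == "" then none else some v
  | none => none

-- B's min-tracking step, expressed on extracted candidates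
def step2 : Option (Int × String) → Int × String → Option (Int × String)
  | none, c => some c
  | some q, c => if c.1 < q.1 then some c else some q

-- B's candidate extractor on an item
def cf (K : List String) (p : String × String) : Option (Int × String) :=
  if p.2 == "" then none else (PySem.List.index? K p.1).map (fun n => ((n : Int), p.2))

-- B's loop body re-expressed through the candidate extractor
def mStep (K : List String) (best : Option (Int × String)) (p : String × String) :
    Option (Int × String) :=
  match cf K p with
  | some b => step2 best b
  | none => best

theorem pvGet_nil (k : String) : pvGet [] k = none := rfl

theorem pvGet_cons (a b : String) (t : List (String × String)) (k : String) :
    pvGet ((a, b) :: t) k = if a == k then some b else pvGet t k :=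
  PySem.Dict.get?_mk_cons a b t k

-- ---- A = firstTruthy over keysOf ----
theorem pickLoopA_eq_firstTruthy (obj : List (String × String)) (field lang : String) (fb : List String) :
    pickLoopA obj field lang fb =
      firstTruthy obj ((fb.filter (fun ln => !(ln == lang))).map (fun ln => field ++ "_" ++ ln) ++ [field, "title"]) := by
  induction fb with
  | nil =>
      simp only [pickLoopA, List.filter_nil, List.map_nil, List.nil_append, firstTruthy]
      cases h : pvGet obj field with
      | none =>
          cases ht : pvGet obj "title" with
          | none => simp [pvTruthy]
          | some t => by_cases htt : t = "" <;> simp [pvTruthy, htt]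
      | some s =>
          by_cases hs : s = ""
          · subst hs
            cases ht : pvGet obj "title" with
            | none => simp [pvTruthy]
            | some t => by_cases htt : t = "" <;> simp [pvTruthy, htt]
          · simp [pvTruthy, hs]
  | cons ln rest ih =>
      by_cases hl : ln == lang
      · simp [pickLoopA, hl, ih]
      · simp only [pickLoopA, hl, List.filter_cons, Bool.not_eq_eq_eq_not, Bool.not_true]
        simp only [if_true, List.map_cons, List.cons_append, firstTruthy]
        cases pvGet obj (field ++ "_" ++ ln) with
        | none => simpa using ih
        | some vv =>
            by_cases hv : vv = "" <;> simp [hv, ih]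

theorem pickA_eq_firstTruthy (obj : List (String × String)) (field lang : String) (fallbacks : Option (List String)) :
    pick_by_lang obj field lang fallbacks = firstTruthy obj (keysOf field lang fallbacks) := by
  unfold pick_by_lang keysOf
  simp only [firstTruthy]
  cases pvGet obj (field ++ "_" ++ lang) with
  | none => exact pickLoopA_eq_firstTruthy obj field lang _
  | some v =>
      by_cases hv : v = "" <;> simp [hv, pickLoopA_eq_firstTruthy]

theorem firstTruthy_eq_findSome (obj : List (String × String)) (ks : List String) :
    firstTruthy obj ks = (ks.findSome? (fA obj)).getD "" := by
  induction ks with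
  | nil => simp [firstTruthy]
  | cons k ks ih =>
      simp only [firstTruthy, List.findSome?_cons, fA]
      cases pvGet obj k with
      | none => simpa using ih
      | some v => by_cases hv : v = "" <;> simp [hv, ih]

-- ---- pyItems facts ----
theorem pvGet_pyItems (l : List (String × String)) :
    ∀ (seen : List String) (k : String), k ∉ seen → pvGet (pyItems l seen) k = pvGet l k := by
  induction l with
  | nil => intro seen k _; rfl
  | cons p rest ih =>
      intro seen k hk
      obtain ⟨a, b⟩ := p
      by_cases ha : a ∈ seen
      · have hak : ¬ (a == k) = true := by
          simp only [beq_iff_eq]; intro h; exact hk (h ▸ ha)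
        simp only [pyItems, if_pos ha, pvGet_cons, if_neg hak]
        exact ih seen k hk
      · simp only [pyItems, if_neg ha, pvGet_cons]
        by_cases hak : (a == k) = true
        · simp [hak]
        · simp only [if_neg hak]
          exact ih (a :: seen) k (by
            intro hmem
            rcases List.mem_cons.mp hmem with h | h
            · exact hak (by simp [h])
            · exact hk h)

theorem pyItems_not_seen (l : List (String × String)) :
    ∀ (seen : List String) (p : String × String), p ∈ pyItems l seen → p.1 ∉ seen := by
  induction l with
  | nil => intro seen p hp; simp [pyItems] at hp
  | cons q rest ih =>
      intro seen p hp
      obtain ⟨a, b⟩ := q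
      by_cases ha : a ∈ seen
      · simp only [pyItems, if_pos ha] at hp; exact ih seen p hp
      · simp only [pyItems, if_neg ha] at hp
        rcases List.mem_cons.mp hp with h | h
        · subst h; exact ha
        · have := ih (a :: seen) p h
          intro hmem; exact this (List.mem_cons_of_mem _ hmem)

theorem pyItems_pairwise (l : List (String × String)) :
    ∀ (seen : List String), (pyItems l seen).Pairwise (fun p q => p.1 ≠ q.1) := by
  induction l with
  | nil => intro seen; simp [pyItems]
  | cons q rest ih =>
      intro seen
      obtain ⟨a, b⟩ := q
      by_cases ha : a ∈ seen
      · simp only [pyItems, if_pos ha]; exact ih seen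
      · simp only [pyItems, if_neg ha]
        refine List.Pairwise.cons ?_ (ih (a :: seen))
        intro p hp
        have := pyItems_not_seen rest (a :: seen) p hp
        intro h; exact this (h ▸ List.mem_cons_self)

-- first-match lookup of a member of a list with pairwise-distinct keys
theorem pvGet_of_mem_nodup (l : List (String × String)) :
    l.Pairwise (fun p q => p.1 ≠ q.1) → ∀ (k w : String), (k, w) ∈ l → pvGet l k = some w := by
  induction l with
  | nil => intro _ k w hmem; cases hmem
  | cons q t ih =>
      intro hnd k w hmem
      obtain ⟨a, b⟩ := q
      rcases List.mem_cons.mp hmem with h | h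
      · cases h
        simp [pvGet_cons]
      · have hak : a ≠ k := by
          have := (List.pairwise_cons.mp hnd).1 (k, w) h
          simpa using this
        rw [pvGet_cons, if_neg (by simpa using hak)]
        exact ih (List.pairwise_cons.mp hnd).2 k w h

theorem mem_of_pvGet (l : List (String × String)) (k w : String) (h : pvGet l k = some w) :
    (k, w) ∈ l := by
  induction l with
  | nil => simp [pvGet_nil] at h
  | cons q t ih =>
      obtain ⟨a, b⟩ := q
      rw [pvGet_cons] at h
      by_cases hak : (a == k) = true
      · rw [if_pos hak] at h
        have hak' : a = k := by simpa using hak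
        cases h
        exact hak' ▸ List.mem_cons_self
      · rw [if_neg hak] at h
        exact List.mem_cons_of_mem _ (ih h)

-- ---- the rank table is index-in-keysOf ----
theorem setdefault_get? {ν : Type} (d : PySem.Dict String ν) (a k : String) (v : ν) :
    (PySem.Dict.setdefault d a v).get? k =
      if k = a then (match d.get? a with | some w => some w | none => some v) else d.get? k := by
  by_cases hc : d.contains a
  · have hsd : PySem.Dict.setdefault d a v = d := by simp [PySem.Dict.setdefault, hc]
    rw [hsd]
    obtain ⟨w, hw⟩ : ∃ w, d.get? a = some w := by
      rw [PySem.Dict.contains_eq_isSome_get?] at hc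
      exact Option.isSome_iff_exists.mp hc
    by_cases hka : k = a
    · subst hka; simp [hw]
    · simp [hka]
  · have hsd : PySem.Dict.setdefault d a v = d.insert a v := by
      apply PySem.Dict.ext
      simp [PySem.Dict.setdefault, hc, PySem.Dict.items_insert_of_not_contains]
    have hga : d.get? a = none := by
      rw [PySem.Dict.contains_eq_isSome_get?] at hc
      simpa using hc
    rw [hsd, PySem.Dict.get?_insert, hga]

theorem rank_get (k : String) (ks : List String) :
    ∀ (s : Int) (d : PySem.Dict String Int),
      ((PySem.List.enumerate ks s).foldl (fun d p => PySem.Dict.setdefault d p.2 p.1) d).get? k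
        = match d.get? k with
          | some v => some v
          | none => (PySem.List.index? ks k).map (fun n => s + (n : Int)) := by
  induction ks with
  | nil =>
      intro s d
      simp only [PySem.List.enumerate_nil, List.foldl_nil]
      cases hg : d.get? k <;> simp [PySem.List.index?]
  | cons a ks ih =>
      intro s d
      rw [PySem.List.enumerate_cons, List.foldl_cons, ih, setdefault_get?]
      by_cases hak : k = a
      · subst hak
        cases hg : d.get? k with
        | some w => simp
        | none =>
            rw [PySem.List.index?_cons_self]
            simp
      · rw [if_neg hak]
        cases hg : d.get? k with
        | some w => simp
        | none =>
            rw [PySem.List.index?_cons_of_ne ks (Ne.symm hak)]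
            cases hi : PySem.List.index? ks k with
            | none => simp
            | some n =>
                simp
                ring

-- ---- min-fold over candidates ----
theorem foldl_min_absorb (p : Int × String) :
    ∀ (c : List (Int × String)), (∀ q ∈ c, ¬ (q.1 < p.1)) → c.foldl step2 (some p) = some p := by
  intro c
  induction c with
  | nil => intro _; rfl
  | cons q rest ih =>
      intro h
      simp only [List.foldl_cons, step2, if_neg (h q List.mem_cons_self)]
      exact ih (fun r hr => h r (List.mem_cons_of_mem _ hr))

theorem foldl_min_reach (p : Int × String) :
    ∀ (c : List (Int × String)) (acc : Option (Int × String)),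
      p ∈ c → (∀ q ∈ c, p.1 ≤ q.1 ∧ (q.1 = p.1 → q = p)) →
      (acc = none ∨ ∃ q, acc = some q ∧ p.1 < q.1) →
      c.foldl step2 acc = some p := by
  intro c
  induction c with
  | nil => intro acc hmem _ _; cases hmem
  | cons q rest ih =>
      intro acc hmem hmin hacc
      by_cases hqp : q = p
      · subst hqp
        have hstep : step2 acc q = some q := by
          rcases hacc with rfl | ⟨q', rfl, hlt⟩
          · rfl
          · simp [step2, hlt]
        simp only [List.foldl_cons, hstep]
        exact foldl_min_absorb q rest (fun r hr => by
          have := (hmin r (List.mem_cons_of_mem _ hr)).1; omega)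
      · have hp : p ∈ rest := by
          rcases List.mem_cons.mp hmem with h | h
          · exact absurd h.symm hqp
          · exact h
        have hle : p.1 ≤ q.1 := (hmin q List.mem_cons_self).1
        have hne : q.1 ≠ p.1 := fun h => hqp ((hmin q List.mem_cons_self).2 h)
        have hlt : p.1 < q.1 := by omega
        refine ih (step2 acc q) hp (fun r hr => hmin r (List.mem_cons_of_mem _ hr)) ?_
        right
        rcases hacc with rfl | ⟨q', rfl, hlt'⟩
        · exact ⟨q, rfl, hlt⟩
        · by_cases h : q.1 < q'.1
          · exact ⟨q, by simp [step2, h], hlt⟩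
          · exact ⟨q', by simp [step2, h], hlt'⟩

theorem foldl_cf_eq (K : List String) (l : List (String × String)) :
    ∀ (acc : Option (Int × String)),
      l.foldl (mStep K) acc = (l.filterMap (cf K)).foldl step2 acc := by
  induction l with
  | nil => intro acc; rfl
  | cons p t ih =>
      intro acc
      simp only [List.foldl_cons, List.filterMap_cons]
      cases h : cf K p with
      | none => simp only [mStep, h]; exact ih acc
      | some b => simp only [mStep, h, List.foldl_cons]; exact ih (step2 acc b)

-- ---- B = findSome? over keysOf ----
theorem alt_eq_findSome (obj : List (String × String)) (field lang : String) (fallbacks : Option (List String)) :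
    pick_by_lang_alt obj field lang fallbacks
      = ((keysOf field lang fallbacks).findSome? (fA obj)).getD "" := by
  have hrank : ∀ x : String,
      (((PySem.List.enumerate (keysOf field lang fallbacks)).foldl
          (fun d p => PySem.Dict.setdefault d p.2 p.1) (PySem.Dict.mk []))).get? x
        = (PySem.List.index? (keysOf field lang fallbacks) x).map (fun n => (n : Int)) := by
    intro x
    rw [rank_get]
    have h0 : (PySem.Dict.mk ([] : List (String × Int))).get? x = none := rfl
    rw [h0]
    cases PySem.List.index? (keysOf field lang fallbacks) x <;> simp
  have hstep : bStep ((PySem.List.enumerate (keysOf field lang fallbacks)).foldl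
          (fun d p => PySem.Dict.setdefault d p.2 p.1) (PySem.Dict.mk []))
      = mStep (keysOf field lang fallbacks) := by
    funext best p
    unfold bStep mStep cf
    rw [hrank p.1]
    by_cases hb : (p.2 == "") = true
    · simp [hb]
    · cases hi : PySem.List.index? (keysOf field lang fallbacks) p.1 with
      | none => simp [hb]
      | some n => cases best <;> simp [hb, step2]
  show (match (pyItems obj []).foldl
      (bStep ((PySem.List.enumerate (keysOf field lang fallbacks)).foldl
        (fun d p => PySem.Dict.setdefault d p.2 p.1) (PySem.Dict.mk []))) none with
    | some q => q.2
    | none => "") = ((keysOf field lang fallbacks).findSome? (fA obj)).getD ""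
  rw [hstep, foldl_cf_eq]
  rcases hfs : (keysOf field lang fallbacks).findSome? (fA obj) with _ | v
  · -- no candidate key is truthy: no item qualifies, the fold stays none
    have hnil : (pyItems obj []).filterMap (cf (keysOf field lang fallbacks)) = [] := by
      rw [List.filterMap_eq_nil_iff]
      intro p hp
      unfold cf
      by_cases hb : (p.2 == "") = true
      · simp [hb]
      · have hget : pvGet obj p.1 = some p.2 := by
          rw [← pvGet_pyItems obj [] p.1 (by simp)]
          exact pvGet_of_mem_nodup _ (pyItems_pairwise obj []) p.1 p.2 (by
            simpa using hp)
        have hidx : PySem.List.index? (keysOf field lang fallbacks) p.1 = none := by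
          rw [PySem.List.index?_eq_none_iff]
          intro hmem
          have hfa := List.findSome?_eq_none_iff.mp hfs p.1 hmem
          unfold fA at hfa
          rw [hget] at hfa
          simp [hb] at hfa
        rw [PySem.List.index?_eq_idxOf?] at hidx
        simp [hb, hidx]
    rw [hnil]
    simp
  · -- v is the first truthy candidate; its item wins the min-fold
    obtain ⟨l₁, a, l₂, hKdec, hfa, hnone⟩ := List.findSome?_eq_some_iff.mp hfs
    have hga : pvGet obj a = some v ∧ v ≠ "" := by
      unfold fA at hfa
      cases hg : pvGet obj a with
      | none => rw [hg] at hfa; simp at hfa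
      | some w =>
          rw [hg] at hfa
          by_cases hw : (w == "") = true
          · simp [hw] at hfa
          · simp [hw] at hfa
            subst hfa
            exact ⟨rfl, by simpa using hw⟩
    have hanl : a ∉ l₁ := by
      intro hmem
      have h := hnone a hmem
      rw [hfa] at h
      cases h
    have hidx : PySem.List.index? (keysOf field lang fallbacks) a = some l₁.length :=
      (PySem.List.index?_eq_some_iff _ a l₁.length).mpr ⟨l₁, l₂, hKdec, rfl, hanl⟩
    obtain ⟨hkl, hKa, -⟩ := PySem.List.getElem_of_index?_eq_some hidx
    have hmemA : (a, v) ∈ pyItems obj [] := by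
      apply mem_of_pvGet
      rw [pvGet_pyItems obj [] a (by simp)]
      exact hga.1
    have hpmem : ((l₁.length : Int), v) ∈ (pyItems obj []).filterMap (cf (keysOf field lang fallbacks)) := by
      apply List.mem_filterMap.mpr
      refine ⟨(a, v), hmemA, ?_⟩
      unfold cf
      rw [if_neg (by simpa using hga.2), hidx]
      rfl
    have hmin : ∀ q ∈ (pyItems obj []).filterMap (cf (keysOf field lang fallbacks)),
        ((l₁.length : Int), v).1 ≤ q.1 ∧ (q.1 = ((l₁.length : Int), v).1 → q = ((l₁.length : Int), v)) := by
      intro q hq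
      obtain ⟨p, hpm, hcf⟩ := List.mem_filterMap.mp hq
      unfold cf at hcf
      by_cases hb : (p.2 == "") = true
      · rw [if_pos hb] at hcf; cases hcf
      · rw [if_neg hb] at hcf
        cases hi : PySem.List.index? (keysOf field lang fallbacks) p.1 with
        | none => rw [hi] at hcf; simp at hcf
        | some n =>
            rw [hi] at hcf
            simp at hcf
            subst hcf
            have hgp : pvGet obj p.1 = some p.2 := by
              rw [← pvGet_pyItems obj [] p.1 (by simp)]
              exact pvGet_of_mem_nodup _ (pyItems_pairwise obj []) p.1 p.2 (by
                simpa using hpm)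
            obtain ⟨hk2, hKn, -⟩ := PySem.List.getElem_of_index?_eq_some hi
            have hge : l₁.length ≤ n := by
              by_contra hlt0
              have hlt : n < l₁.length := Nat.lt_of_not_le hlt0
              have hmem1 : p.1 ∈ l₁ := by
                have h1 : (keysOf field lang fallbacks)[n]'hk2
                    = (l₁ ++ a :: l₂)[n]'(hKdec ▸ hk2) := List.getElem_of_eq hKdec hk2
                have h2 : (l₁ ++ a :: l₂)[n]'(hKdec ▸ hk2) = l₁[n]'hlt :=
                  List.getElem_append_left hlt
                have h3 : p.1 = l₁[n]'hlt := by rw [← hKn, h1, h2]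
                rw [h3]
                exact List.getElem_mem _
              have hfa1 := hnone p.1 hmem1
              unfold fA at hfa1
              rw [hgp] at hfa1
              simp [hb] at hfa1
            refine ⟨by simpa using hge, ?_⟩
            intro hEq
            have hn : n = l₁.length := by simpa using hEq
            subst hn
            have hpa : p.1 = a := by rw [← hKa, ← hKn]
            have hpv : p.2 = v := by
              rw [hpa, hga.1] at hgp
              injection hgp with h
              exact h.symm
            simp [hpv]
    rw [foldl_min_reach ((l₁.length : Int), v) _ none hpmem hmin (Or.inl rfl)]
    simp

-- ===== VERDICT (by name: the statement is the Claim_ definition above) =====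
theorem pick_by_lang_spec : Claim_equal_pick_by_lang := by
  intro obj field lang fallbacks _
  unfold Spec_pick_by_lang
  rw [pickA_eq_firstTruthy, firstTruthy_eq_findSome, alt_eq_findSome]
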